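-- pv_equiv track=rewrite | github.com/kylindreagan/Programming-Team | kattis/SeniorYear/colorland.py | board_search
-- ===== SOURCE A (Python) =====
-- from collections import deque
-- from bisect import bisect_right
--
-- def board_search(colors):
--     n = len(colors)
--
--     board = {}
--     for i, c in enumerate(colors):
--         board.setdefault(c, []).append(i)
--
--     q = deque([( -1, 0 )])
--     visited_positions = set([-1])
--
--     while q:
--         pos, steps = q.popleft()
--
--         if pos == n - 1:
--             return steps
--
--         for c, lst in board.items():
--             j = bisect_right(lst, pos)
--             if j == len(lst):
--                 continue
--
--             nxt = lst[j]
--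
--             if nxt not in visited_positions:
--                 visited_positions.add(nxt)
--                 q.append((nxt, steps + 1))
-- ===== SOURCE B (Python) =====
-- def board_search(colors):
--     # Left-to-right DP instead of BFS: d[p+1] = fewest jumps to reach position p
--     # (p = -1 is the start). Cell i is reachable in one jump exactly from the
--     # positions in [prev_occurrence(colors[i]), i-1], so its distance is one more
--     # than the minimum of d over that window.
--     n = len(colors)
--     d = [0] * (n + 1)
--     last = {}
--     for i, c in enumerate(colors):
--         p = last.get(c, -1)
--         d[i + 1] = 1 + min(d[p + 1:i + 1])
--         last[c] = i
--     return d[n]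
-- ===== Notes on version B (the rewrite author's own statement) =====
-- stated objective: faster
-- what changed: Replaced the BFS over the next-occurrence graph (each dequeued node scans every distinct color with a binary search) by a single left-to-right DP: dist of cell i is 1 + min of dist over the contiguous window [previous occurrence of its color, i-1].
import Mathlib
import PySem

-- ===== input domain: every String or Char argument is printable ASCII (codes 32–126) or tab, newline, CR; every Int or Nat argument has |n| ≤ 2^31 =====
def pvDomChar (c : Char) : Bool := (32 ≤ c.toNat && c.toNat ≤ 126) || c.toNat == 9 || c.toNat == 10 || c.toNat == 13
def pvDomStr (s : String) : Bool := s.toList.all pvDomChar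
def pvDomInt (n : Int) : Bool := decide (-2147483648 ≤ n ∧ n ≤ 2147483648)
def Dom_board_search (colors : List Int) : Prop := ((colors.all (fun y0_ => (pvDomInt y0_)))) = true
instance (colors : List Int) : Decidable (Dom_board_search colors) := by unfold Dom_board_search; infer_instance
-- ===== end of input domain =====

-- B replaces A's BFS over the next-occurrence graph by a left-to-right DP
-- (dist of cell i = 1 + min dist over the window starting at the previous
-- same-color occurrence); measurably faster, same return value on every input.

-- ===== PORT A =====

/-- One step of A's inner `for c, lst in board.items()` loop body
    (accumulator = (queue tail so far, visited set)). -/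
def pvStepFold (steps : Int) (pos : Int)
    (acc : List (Int × Int) × PySem.Set Int) (cl : Int × List Int) :
    List (Int × Int) × PySem.Set Int :=
  let j := PySem.List.bisectRight cl.2 pos
  if j = cl.2.length then acc
  else
    let nxt := PySem.List.pyGetD cl.2 (j : Int) 0
    if acc.2.contains nxt then acc
    else (acc.1 ++ [(nxt, steps + 1)], acc.2.add nxt)

/-- Termination measure for A's `while q:` loop: queue length plus twice the
    number of board positions not yet visited. -/
def pvUnvisited (items : List (Int × List Int)) (vis : PySem.Set Int) : Nat :=
  ((PySem.Set.ofList (items.flatMap (fun cl => cl.2))).filter (fun x => !(vis.contains x))).length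

theorem bisectLoop_le (xs : List Int) (x : Int) :
    ∀ (fuel lo hi : Nat), lo ≤ hi → PySem.List.bisectRightLoop xs x fuel lo hi ≤ hi := by
  intro fuel
  induction fuel with
  | zero => intro lo hi h; simpa [PySem.List.bisectRightLoop] using h
  | succ f ih =>
    intro lo hi h
    rw [PySem.List.bisectRightLoop]
    by_cases hlh : lo < hi
    · simp only [hlh, if_true]
      cases hxy : xs[(lo + hi) / 2]? with
      | none => omega
      | some y =>
        by_cases hx : x < y
        · simp only [hx, if_true]
          exact le_trans (ih lo ((lo + hi) / 2) (by omega)) (by omega)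
        · simp only [hx, if_false]
          exact ih ((lo + hi) / 2 + 1) hi (by omega)
    · simpa [hlh] using h

theorem bisectRight_le (xs : List Int) (x : Int) :
    PySem.List.bisectRight xs x ≤ xs.length :=
  bisectLoop_le xs x xs.length 0 xs.length (Nat.zero_le _)

theorem set_contains_iff (s : PySem.Set Int) (x : Int) : s.contains x = true ↔ x ∈ s := by
  constructor <;> intro h <;> simp_all [PySem.Set.contains]

theorem pvUnvisited_add_lt (items : List (Int × List Int)) (vis : PySem.Set Int) (x : Int)
    (hx : x ∈ items.flatMap (fun cl => cl.2)) (hv : ¬ x ∈ vis) :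
    pvUnvisited items (vis.add x) + 1 ≤ pvUnvisited items vis := by
  unfold pvUnvisited
  have hb : ∀ y : Int, ((vis.add x).contains y = true) ↔ (vis.contains y = true ∨ y = x) := by
    intro y
    rw [set_contains_iff, PySem.Set.mem_add, set_contains_iff]
  have hnd : (PySem.Set.ofList (items.flatMap (fun cl => cl.2)) : List Int).Nodup :=
    PySem.Set.nodup_ofList _
  have hxA : x ∈ (PySem.Set.ofList (items.flatMap (fun cl => cl.2)) : List Int) :=
    (PySem.Set.mem_ofList _ _).mpr hx
  have h1 : (PySem.Set.ofList (items.flatMap (fun cl => cl.2)) : List Int).filter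
        (fun y => !((vis.add x).contains y))
      = ((PySem.Set.ofList (items.flatMap (fun cl => cl.2)) : List Int).filter
        (fun y => !(vis.contains y))).filter (fun y => y != x) := by
    rw [List.filter_filter]
    apply List.filter_congr
    intro y _
    by_cases h2 : y = x
    · subst h2
      have : (vis.add y).contains y = true := (hb y).mpr (Or.inr rfl)
      simp [this]
    · have h3 : (vis.add x).contains y = vis.contains y := by
        cases hc : vis.contains y
        · by_contra hne
          have := (hb y).mp (by revert hne; cases ((vis.add x).contains y) <;> simp_all)
          simp_all
        · exact (hb y).mpr (Or.inl hc)
      simp [h3, h2]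
  rw [h1]
  have hxB : x ∈ (PySem.Set.ofList (items.flatMap (fun cl => cl.2)) : List Int).filter
      (fun y => !(vis.contains y)) := by
    rw [List.mem_filter]
    refine ⟨hxA, ?_⟩
    have : ¬ (vis.contains x = true) := fun hc => hv ((set_contains_iff vis x).mp hc)
    simp_all
  have hndB := hnd.filter (fun y => !(vis.contains y))
  rw [← hndB.erase_eq_filter x, List.length_erase_of_mem hxB]
  have := List.length_pos_of_mem hxB
  omega

theorem pvStepFold_measure (steps pos : Int) (items : List (Int × List Int))
    (acc : List (Int × Int) × PySem.Set Int) (cl : Int × List Int) (hcl : cl ∈ items) :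
    (pvStepFold steps pos acc cl).1.length + 2 * pvUnvisited items (pvStepFold steps pos acc cl).2
      ≤ acc.1.length + 2 * pvUnvisited items acc.2 := by
  unfold pvStepFold
  dsimp only
  split_ifs with h1 h2
  · exact le_refl _
  · exact le_refl _
  · have hj : PySem.List.bisectRight cl.2 pos < cl.2.length :=
      lt_of_le_of_ne (bisectRight_le _ _) h1
    have hget : PySem.List.pyGetD cl.2 ((PySem.List.bisectRight cl.2 pos : Nat) : Int) 0
        = cl.2[PySem.List.bisectRight cl.2 pos] := by
      rw [PySem.List.pyGetD_natCast, List.getD_eq_getElem?_getD, List.getElem?_eq_getElem hj]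
      rfl
    have hmem : PySem.List.pyGetD cl.2 ((PySem.List.bisectRight cl.2 pos : Nat) : Int) 0
        ∈ items.flatMap (fun cl => cl.2) := by
      rw [hget]
      exact List.mem_flatMap.mpr ⟨cl, hcl, List.getElem_mem hj⟩
    have hnot : ¬ (PySem.List.pyGetD cl.2 ((PySem.List.bisectRight cl.2 pos : Nat) : Int) 0
        ∈ acc.2) := fun hmm => h2 ((set_contains_iff _ _).mpr hmm)
    have := pvUnvisited_add_lt items acc.2 _ hmem hnot
    simp only [List.length_append, List.length_cons, List.length_nil]
    omega

theorem pvFoldl_measure (steps pos : Int) (items : List (Int × List Int))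
    (L : List (Int × List Int)) (hL : ∀ cl ∈ L, cl ∈ items)
    (acc : List (Int × Int) × PySem.Set Int) :
    (L.foldl (pvStepFold steps pos) acc).1.length
      + 2 * pvUnvisited items (L.foldl (pvStepFold steps pos) acc).2
      ≤ acc.1.length + 2 * pvUnvisited items acc.2 := by
  induction L generalizing acc with
  | nil => simp
  | cons c t ih =>
    simp only [List.foldl_cons]
    exact le_trans (ih (fun cl h => hL cl (List.mem_cons_of_mem _ h)) _)
      (pvStepFold_measure steps pos items acc c (hL c List.mem_cons_self))

/-- A's `while q:` loop.  The `[]` branch is Python's fall-through (`return None`);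
    it is proven unreachable from the initial state in the lemmas below. -/
def bfsLoop (n : Int) (items : List (Int × List Int)) :
    List (Int × Int) → PySem.Set Int → Int
  | [], _ => 0
  | (pos, steps) :: rest, vis =>
    if pos = n - 1 then steps
    else
      let st := items.foldl (pvStepFold steps pos) (rest, vis)
      bfsLoop n items st.1 st.2
termination_by q vis => q.length + 2 * pvUnvisited items vis
decreasing_by
  simp only [List.foldl_attach, List.length_cons]
  have h := pvFoldl_measure steps pos items items (fun _ h => h) (rest, vis)
  simp only [Prod.fst, Prod.snd] at h
  omega

/-- A's board-building loop: `board.setdefault(c, []).append(i)` over `enumerate(colors)`. -/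
def pvBoard (colors : List Int) : PySem.Dict Int (List Int) :=
  (PySem.List.enumerate colors).foldl
    (fun d ic => d.modify ic.2 [] (fun l => l ++ [ic.1])) PySem.Dict.empty

def board_search (colors : List Int) : Int :=
  let n : Int := colors.length
  let board := pvBoard colors
  bfsLoop n board.items [(-1, 0)] (PySem.Set.ofList [-1])

-- ===== PORT B =====

def board_search_alt (colors : List Int) : Int :=
  let n := colors.length
  let st := (PySem.List.enumerate colors).foldl
      (fun (st : List Int × PySem.Dict Int Int) ic =>
        let p := st.2.getD ic.2 (-1)
        -- d[p+1 : i+1]; provably nonempty whenever taken, so Python's min cannot raise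
        let s := PySem.List.slice st.1 (some (p + 1)) (some (ic.1 + 1))
        let m := (PySem.List.min? s (fun x => x)).getD 0
        (PySem.List.pySetD st.1 (ic.1 + 1) (1 + m), st.2.insert ic.2 ic.1))
      (List.replicate (n + 1) 0, PySem.Dict.empty)
  PySem.List.pyGetD st.1 (n : Int) 0

-- ===== PRECONDITION & SPEC =====
def Spec_board_search (colors : List Int) (out : Int) : Prop := out = board_search_alt colors
instance (colors : List Int) (out : Int) : Decidable (Spec_board_search colors out) := by unfold Spec_board_search; infer_instance

-- ===== CLAIM (what is proved, stated in full; the proofs are below) =====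
def Claim_equal_board_search : Prop := ∀ (colors : List Int), Dom_board_search colors → Spec_board_search colors (board_search colors)

-- ===== LEMMAS AND PROOFS =====

/-- `colors[k]` (indices used below are always in range). -/
def cget (c : List Int) (k : Nat) : Int := c.getD k 0

/-- One plus the last index `< i` holding `colors[i]`'s color; `0` if none. -/
def pvN (c : List Int) (i : Nat) : Nat :=
  (List.range i).foldl (fun acc j => if cget c j = cget c i then j + 1 else acc) 0

def listMinN : List Nat → Nat
  | [] => 0
  | x :: t => t.foldl min x

/-- Reference DP table: `fdL c m` lists the fewest-jump distances of positions `-1,0,…,m-1`. -/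
def fdL (c : List Int) : Nat → List Nat
  | 0 => [0]
  | i + 1 => fdL c i ++ [1 + listMinN ((fdL c i).drop (pvN c i))]

/-- Fewest jumps from the start to position `k-1` (`k = 0` is the start itself). -/
def fd (c : List Int) (k : Nat) : Nat := (fdL c k).getD k 0

/-- `fd` on `Int` positions (`p = -1` is the start). -/
def fdI (c : List Int) (p : Int) : Nat := fd c (p + 1).toNat

/-- One BFS move of A: from position `p` one can jump to cell `i` iff no cell strictly
    between them has `colors[i]`'s color. -/
def PStep (c : List Int) (p : Int) (i : Nat) : Prop :=
  i < c.length ∧ p < (i : Int) ∧ ∀ j : Nat, p < (j : Int) → j < i → cget c j ≠ cget c i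

/-- What A's inner loop computes from one occurrence list: the first element after `pos`. -/
def nextIn (lst : List Int) (pos : Int) : Option Int :=
  lst[PySem.List.bisectRight lst pos]?

/-- Occurrence list of color `v`, as A's board stores it. -/
def occL (c : List Int) (v : Int) : List Int :=
  ((PySem.List.enumerate c).filter (fun p => p.2 == v)).map Prod.fst

/-- The BFS loop invariant. -/
def QInv (c : List Int) (q : List (Int × Int)) (vis : PySem.Set Int) : Prop :=
  ((-1 : Int) ∈ vis)
  ∧ (∀ x ∈ vis, -1 ≤ x ∧ x < (c.length : Int))
  ∧ (∀ e ∈ q, -1 ≤ e.1 ∧ e.1 < (c.length : Int) ∧ e.1 ∈ vis ∧ e.2 = (fdI c e.1 : Int))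
  ∧ q.Pairwise (fun a b => a.2 ≤ b.2 ∧ b.2 ≤ a.2 + 1)
  ∧ (q.map Prod.fst).Nodup
  ∧ (∀ p0 s0 t, q = (p0, s0) :: t →
       ∀ u : Int, -1 ≤ u → u < (c.length : Int) → (fdI c u : Int) ≤ s0 → u ∈ vis)
  ∧ (∀ u ∈ vis, (∀ s, (u, s) ∉ q) → ∀ i : Nat, PStep c u i → ((i : Int) ∈ vis))
  ∧ (((c.length : Int) - 1) ∈ vis → ∃ s, ((c.length : Int) - 1, s) ∈ q)

theorem fdL_length (cs : List Int) (m : Nat) : (fdL cs m).length = m + 1 := by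
  induction m with
  | zero => rfl
  | succ i ih => simp [fdL, ih]

theorem fd_getD (c : List Int) {k m : Nat} (h : k ≤ m) : (fdL c m).getD k 0 = fd c k := by
  induction m with
  | zero =>
    have : k = 0 := by omega
    subst this; rfl
  | succ i ih =>
    rcases Nat.lt_or_ge k (i + 1) with hk | hk
    · rw [fdL, List.getD_append _ _ _ _ (by rw [fdL_length]; omega)]
      exact ih (by omega)
    · have : k = i + 1 := by omega
      subst this; rfl

theorem fd_succ (c : List Int) (i : Nat) :
    fd c (i + 1) = 1 + listMinN ((fdL c i).drop (pvN c i)) := by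
  show (fdL c (i + 1)).getD (i + 1) 0 = _
  rw [fdL, List.getD_eq_getElem?_getD, List.getElem?_append_right (by rw [fdL_length])]
  simp [fdL_length]

theorem pvN_fold_spec (c : List Int) (i : Nat) (m : Nat) :
    ((List.range m).foldl (fun acc j => if cget c j = cget c i then j + 1 else acc) 0 ≤ m)
    ∧ (∀ j, (List.range m).foldl (fun acc j => if cget c j = cget c i then j + 1 else acc) 0 ≤ j
        → j < m → cget c j ≠ cget c i)
    ∧ (0 < (List.range m).foldl (fun acc j => if cget c j = cget c i then j + 1 else acc) 0
        → (List.range m).foldl (fun acc j => if cget c j = cget c i then j + 1 else acc) 0 - 1 < m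
          ∧ cget c ((List.range m).foldl (fun acc j => if cget c j = cget c i then j + 1 else acc) 0 - 1)
            = cget c i) := by
  induction m with
  | zero => simp
  | succ m ih =>
    have e : (List.range (m + 1)).foldl (fun acc j => if cget c j = cget c i then j + 1 else acc) 0
        = (fun acc j => if cget c j = cget c i then j + 1 else acc)
            ((List.range m).foldl (fun acc j => if cget c j = cget c i then j + 1 else acc) 0) m := by
      rw [List.range_succ, List.foldl_append]; rfl
    obtain ⟨ih1, ih2, ih3⟩ := ih
    by_cases hc : cget c m = cget c i
    · rw [e]; simp only [hc, if_true]
      refine ⟨le_refl _, ?_, ?_⟩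
      · intro j hj1 hj2; omega
      · intro _; simpa using hc
    · rw [e]; simp only [hc, if_false]
      refine ⟨by omega, ?_, fun h0 => ⟨by have := (ih3 h0).1; omega, (ih3 h0).2⟩⟩
      intro j hj1 hj2
      rcases Nat.lt_or_ge j m with h | h
      · exact ih2 j hj1 h
      · have : j = m := by omega
        subst this; exact hc

theorem pvN_le (c : List Int) (i : Nat) : pvN c i ≤ i := (pvN_fold_spec c i i).1

theorem pvN_no_between (c : List Int) (i : Nat) :
    ∀ j, pvN c i ≤ j → j < i → cget c j ≠ cget c i := (pvN_fold_spec c i i).2.1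

theorem pvN_color (c : List Int) (i : Nat) (h : 0 < pvN c i) :
    pvN c i - 1 < i ∧ cget c (pvN c i - 1) = cget c i := (pvN_fold_spec c i i).2.2 h

theorem listMinN_spec (l : List Nat) (h : l ≠ []) :
    listMinN l ∈ l ∧ ∀ x ∈ l, listMinN l ≤ x := by
  cases l with
  | nil => exact absurd rfl h
  | cons x t =>
    show t.foldl min x ∈ x :: t ∧ _
    constructor
    · rcases PySem.List.foldl_min_mem t x with h1 | h1
      · rw [h1]; exact List.mem_cons_self
      · exact List.mem_cons_of_mem _ h1
    · intro z hz
      rcases List.mem_cons.mp hz with h1 | h1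
      · subst h1; exact (PySem.List.foldl_min_le t z).1
      · exact (PySem.List.foldl_min_le t x).2 z h1

theorem fd_getElem (c : List Int) {m k : Nat} (h : k ≤ m) (hk : k < (fdL c m).length) :
    (fdL c m)[k] = fd c k := by
  have h2 := fd_getD c h
  rw [List.getD_eq_getElem?_getD, List.getElem?_eq_getElem hk] at h2
  simpa using h2

theorem mem_drop_fdL (c : List Int) {i w : Nat} {y : Nat}
    (h : y ∈ (fdL c i).drop w) : ∃ k, w ≤ k ∧ k ≤ i ∧ y = fd c k := by
  obtain ⟨r, hr, he⟩ := List.mem_iff_getElem.mp h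
  rw [List.getElem_drop] at he
  have hlen : (fdL c i).length = i + 1 := fdL_length c i
  have hr' : w + r < i + 1 := by
    have := hr
    rw [List.length_drop, hlen] at this
    omega
  refine ⟨w + r, by omega, by omega, ?_⟩
  rw [← he, fd_getElem c (by omega)]

theorem fd_mem_drop (c : List Int) {i w k : Nat} (h1 : w ≤ k) (h2 : k ≤ i) :
    fd c k ∈ (fdL c i).drop w := by
  have hlen : (fdL c i).length = i + 1 := fdL_length c i
  apply List.mem_iff_getElem.mpr
  refine ⟨k - w, by rw [List.length_drop, hlen]; omega, ?_⟩
  rw [List.getElem_drop, fd_getElem c (by omega)]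
  congr 1; omega

theorem drop_fdL_ne_nil (c : List Int) (i : Nat) : (fdL c i).drop (pvN c i) ≠ [] := by
  intro h
  have h2 := congrArg List.length h
  rw [List.length_drop, fdL_length] at h2
  have h3 := pvN_le c i
  simp only [List.length_nil] at h2
  omega

theorem fd_succ_le (c : List Int) {i k : Nat} (h1 : pvN c i ≤ k) (h2 : k ≤ i) :
    fd c (i + 1) ≤ 1 + fd c k := by
  rw [fd_succ]
  have := (listMinN_spec _ (drop_fdL_ne_nil c i)).2 _ (fd_mem_drop c h1 h2)
  omega

theorem fd_succ_achieved (c : List Int) (i : Nat) :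
    ∃ k, pvN c i ≤ k ∧ k ≤ i ∧ fd c (i + 1) = 1 + fd c k := by
  obtain ⟨hm, _⟩ := listMinN_spec _ (drop_fdL_ne_nil c i)
  obtain ⟨k, hk1, hk2, hk3⟩ := mem_drop_fdL c hm
  exact ⟨k, hk1, hk2, by rw [fd_succ, hk3]⟩

theorem step_iff (c : List Int) {p : Int} {i : Nat} (hp : -1 ≤ p) :
    PStep c p i ↔ i < c.length ∧ p < (i : Int) ∧ (pvN c i : Int) ≤ p + 1 := by
  constructor
  · rintro ⟨hi, hpi, hno⟩
    refine ⟨hi, hpi, ?_⟩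
    by_contra hlt
    push_neg at hlt
    have hpos : 0 < pvN c i := by omega
    obtain ⟨h1, h2⟩ := pvN_color c i hpos
    exact hno (pvN c i - 1) (by omega) h1 h2
  · rintro ⟨hi, hpi, hle⟩
    exact ⟨hi, hpi, fun j hj1 hj2 => pvN_no_between c i j (by omega) hj2⟩

theorem fdI_step_le (c : List Int) {p : Int} {i : Nat} (hp : -1 ≤ p) (hs : PStep c p i) :
    fd c (i + 1) ≤ fdI c p + 1 := by
  obtain ⟨hi, hpi, hle⟩ := (step_iff c hp).mp hs
  have h1 : pvN c i ≤ (p + 1).toNat := by omega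
  have h2 : (p + 1).toNat ≤ i := by omega
  have := fd_succ_le c h1 h2
  unfold fdI
  omega

theorem fdI_pred (c : List Int) {i d : Nat} (hi : i < c.length) (h : fd c (i + 1) = d + 1) :
    ∃ p : Int, -1 ≤ p ∧ PStep c p i ∧ fdI c p = d := by
  obtain ⟨k, hk1, hk2, hk3⟩ := fd_succ_achieved c i
  refine ⟨(k : Int) - 1, by omega, ?_, ?_⟩
  · rw [step_iff c (by omega)]
    exact ⟨hi, by omega, by omega⟩
  · unfold fdI
    have he : ((k : Int) - 1 + 1).toNat = k := by omega
    rw [he]; omega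

theorem closure_reaches (c : List Int) (vis : PySem.Set Int) (hn : 1 ≤ c.length)
    (hclosed : ∀ u ∈ vis, ∀ i : Nat, PStep c u i → ((i : Int) ∈ vis))
    (hstart : (-1 : Int) ∈ vis) : ((c.length : Int) - 1) ∈ vis := by
  suffices H : ∀ m : Nat, ∀ p : Int, p ∈ vis → -1 ≤ p → p ≤ (c.length : Int) - 1 →
      ((c.length : Int) - 1 - p).toNat ≤ m → ((c.length : Int) - 1) ∈ vis by
    exact H c.length (-1) hstart (le_refl _) (by omega) (by omega)
  intro m
  induction m with
  | zero =>
    intro p hp h1 h2 h3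
    have he : p = (c.length : Int) - 1 := by omega
    exact he ▸ hp
  | succ m ih =>
    intro p hp h1 h2 h3
    by_cases he : p = (c.length : Int) - 1
    · exact he ▸ hp
    · have hplt : p < (c.length : Int) - 1 := by omega
      have hP : ∃ j : Nat, p < (j : Int) ∧ j ≤ c.length - 1 ∧ cget c j = cget c (c.length - 1) :=
        ⟨c.length - 1, by omega, le_refl _, rfl⟩
      obtain ⟨hi1, hi2, hi3⟩ := Nat.find_spec hP
      have hstep : PStep c p (Nat.find hP) := by
        refine ⟨by omega, hi1, fun j hj1 hj2 heq => ?_⟩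
        exact Nat.find_min hP hj2 ⟨hj1, by omega, by rw [heq, hi3]⟩
      have hiv := hclosed p hp _ hstep
      exact ih ((Nat.find hP : Nat) : Int) hiv (by omega) (by omega) (by omega)

theorem fd_pos (cs : List Int) (i : Nat) : 1 ≤ fd cs (i + 1) := by
  rw [fd_succ]; omega

theorem fdI_neg_one (cs : List Int) : fdI cs (-1) = 0 := rfl

theorem cget_eq (cs : List Int) {k : Nat} (h : k < cs.length) : cget cs k = cs[k] := by
  unfold cget
  rw [List.getD_eq_getElem?_getD, List.getElem?_eq_getElem h]
  rfl

theorem board_keys_nodup (cs : List Int) : (pvBoard cs).keys.Nodup := by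
  unfold pvBoard
  exact PySem.Dict.nodup_keys_foldl_modify_key (PySem.List.enumerate cs) (fun ic => ic.2) []
    (fun _ ic l => l ++ [ic.1]) PySem.Dict.empty (by simp)

theorem board_keys (cs : List Int) : (pvBoard cs).keys = PySem.Set.ofList cs := by
  unfold pvBoard
  rw [PySem.Dict.keys_foldl_modify_key (PySem.List.enumerate cs) (fun ic => ic.2) []
    (fun _ ic l => l ++ [ic.1]) PySem.Dict.empty]
  rw [PySem.Dict.keys_empty, PySem.Set.update_nil_left, PySem.List.map_snd_enumerate]

theorem board_getD (cs : List Int) (v : Int) : (pvBoard cs).getD v [] = occL cs v := by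
  have e : pvBoard cs = ((PySem.List.enumerate cs).map (fun p => (p.2, p.1))).foldl
      (fun d p => d.modify p.1 [] (fun l => l ++ [p.2])) PySem.Dict.empty := by
    rw [List.foldl_map]
    rfl
  rw [e, PySem.Dict.getD_foldl_modify_append]
  unfold occL
  rw [List.filter_map]
  simp [List.map_map, Function.comp_def]

theorem board_items_mem (cs : List Int) {cl : Int × List Int} (h : cl ∈ (pvBoard cs).items) :
    cl.2 = occL cs cl.1 := by
  have h2 : (cl.1, cl.2) ∈ (pvBoard cs).items := by simpa using h
  have := PySem.Dict.getD_of_mem_items (pvBoard cs) h2 (board_keys_nodup cs) []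
  rw [board_getD] at this
  exact this.symm

theorem occL_mem (cs : List Int) (v x : Int) :
    x ∈ occL cs v ↔ ∃ k : Nat, k < cs.length ∧ x = (k : Int) ∧ cget cs k = v := by
  unfold occL
  constructor
  · intro hx
    obtain ⟨p, hp, rfl⟩ := List.mem_map.mp hx
    obtain ⟨hpe, hpv⟩ := List.mem_filter.mp hp
    obtain ⟨k, hk, rfl⟩ := (PySem.List.mem_enumerate_iff cs 0 p).mp hpe
    refine ⟨k, hk, by simp, ?_⟩
    rw [cget_eq cs hk]
    simpa using hpv
  · rintro ⟨k, hk, rfl, hcv⟩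
    apply List.mem_map.mpr
    refine ⟨((k : Int), cs[k]), List.mem_filter.mpr ⟨?_, ?_⟩, rfl⟩
    · exact (PySem.List.mem_enumerate_iff cs 0 _).mpr ⟨k, hk, by simp⟩
    · rw [cget_eq cs hk] at hcv
      simpa using hcv

theorem occL_sorted (cs : List Int) (v : Int) : (occL cs v).Pairwise (· ≤ ·) := by
  unfold occL
  rw [List.pairwise_map]
  exact (((PySem.List.pairwise_lt_enumerate cs 0)).sublist List.filter_sublist).imp le_of_lt

theorem nextIn_some_spec {lst : List Int} (hs : lst.Pairwise (· ≤ ·)) {pos x : Int}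
    (h : nextIn lst pos = some x) :
    x ∈ lst ∧ pos < x ∧ ∀ y ∈ lst, pos < y → x ≤ y := by
  unfold nextIn at h
  obtain ⟨hjl, hx⟩ := List.getElem?_eq_some_iff.mp h
  obtain ⟨hle, hlow, hhigh⟩ := PySem.List.bisectRight_spec lst pos hs
  refine ⟨hx ▸ List.getElem_mem hjl, by rw [← hx]; exact hhigh _ hjl (le_refl _), ?_⟩
  intro y hy hpy
  obtain ⟨iy, hiy, rfl⟩ := List.mem_iff_getElem.mp hy
  rcases Nat.lt_or_ge iy (PySem.List.bisectRight lst pos) with hlt | hge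
  · exact absurd (hlow iy hiy hlt) (by omega)
  · rw [← hx]
    rcases Nat.eq_or_lt_of_le hge with he | hlt2
    · exact le_of_eq (by congr 1)
    · exact (List.pairwise_iff_getElem.mp hs) _ iy hjl hiy hlt2

theorem nextIn_isSome {lst : List Int} (hs : lst.Pairwise (· ≤ ·)) {pos y : Int}
    (hy : y ∈ lst) (hlt : pos < y) : ∃ x, nextIn lst pos = some x := by
  obtain ⟨iy, hiy, rfl⟩ := List.mem_iff_getElem.mp hy
  have hle := (PySem.List.bisectRight_spec lst pos hs).2.1
  have hj : PySem.List.bisectRight lst pos ≤ iy := by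
    by_contra hlt2
    push_neg at hlt2
    exact absurd (hle iy hiy hlt2) (by omega)
  exact ⟨lst[PySem.List.bisectRight lst pos]'(by omega),
    by unfold nextIn; rw [List.getElem?_eq_getElem (by omega)]⟩

theorem succ_exists_in_board (cs : List Int) {pos : Int} {i : Nat} (h : PStep cs pos i) :
    ∃ cl ∈ (pvBoard cs).items, nextIn cl.2 pos = some (i : Int) := by
  obtain ⟨hi, hpi, hno⟩ := h
  have hkmem : cget cs i ∈ (pvBoard cs).keys := by
    rw [board_keys, PySem.Set.mem_ofList, cget_eq cs hi]
    exact List.getElem_mem hi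
  have hcon : (pvBoard cs).contains (cget cs i) = true :=
    (PySem.Dict.contains_iff_mem_keys _ _).mpr hkmem
  rw [PySem.Dict.contains_eq_isSome_get?] at hcon
  obtain ⟨lst, heq⟩ := Option.isSome_iff_exists.mp hcon
  have hitem := PySem.Dict.mem_items_of_get?_eq_some _ heq
  have hlst : lst = occL cs (cget cs i) := board_items_mem cs hitem
  have himem : (i : Int) ∈ occL cs (cget cs i) := (occL_mem cs _ _).mpr ⟨i, hi, rfl, rfl⟩
  obtain ⟨x, hx⟩ := nextIn_isSome (occL_sorted cs _) himem hpi
  obtain ⟨hxm, hpx, hmin⟩ := nextIn_some_spec (occL_sorted cs _) hx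
  obtain ⟨kx, hkx, rfl, hcx⟩ := (occL_mem cs _ _).mp hxm
  have hle := hmin (i : Int) himem hpi
  have hek : kx = i := by
    rcases Nat.lt_or_ge kx i with hlt | hge
    · exact absurd hcx (hno kx hpx hlt)
    · omega
  subst hek
  exact ⟨(cget cs kx, lst), hitem, by rw [hlst]; exact hx⟩

theorem board_next_PStep (cs : List Int) {cl : Int × List Int} (hcl : cl ∈ (pvBoard cs).items)
    {pos x : Int} (h : nextIn cl.2 pos = some x) :
    0 ≤ x ∧ x < (cs.length : Int) ∧ PStep cs pos x.toNat := by
  have hlst := board_items_mem cs hcl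
  rw [hlst] at h
  obtain ⟨hxm, hpx, hmin⟩ := nextIn_some_spec (occL_sorted cs _) h
  obtain ⟨k, hk, rfl, hck⟩ := (occL_mem cs _ _).mp hxm
  have ht : ((k : Int)).toNat = k := Int.toNat_natCast k
  refine ⟨by omega, by exact_mod_cast hk, ?_⟩
  rw [ht]
  refine ⟨hk, hpx, fun j hj1 hj2 heq => ?_⟩
  have hjm : (j : Int) ∈ occL cs cl.1 :=
    (occL_mem cs _ _).mpr ⟨j, by omega, rfl, by rw [heq, hck]⟩
  have := hmin (j : Int) hjm hj1
  omega

theorem pvStepFold_eval (steps pos : Int) (acc : List (Int × Int) × PySem.Set Int)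
    (cl : Int × List Int) :
    pvStepFold steps pos acc cl =
      if PySem.List.bisectRight cl.2 pos = cl.2.length then acc
      else if acc.2.contains (PySem.List.pyGetD cl.2 ((PySem.List.bisectRight cl.2 pos : Nat) : Int) 0) = true then acc
      else (acc.1 ++ [(PySem.List.pyGetD cl.2 ((PySem.List.bisectRight cl.2 pos : Nat) : Int) 0, steps + 1)],
            acc.2.add (PySem.List.pyGetD cl.2 ((PySem.List.bisectRight cl.2 pos : Nat) : Int) 0)) := rfl

theorem pvFoldl_spec (steps pos : Int) (L : List (Int × List Int)) :
    ∀ (q0 : List (Int × Int)) (v0 : PySem.Set Int),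
    ∃ t : List (Int × Int),
      (L.foldl (pvStepFold steps pos) (q0, v0)).1 = q0 ++ t
      ∧ (∀ x : Int, x ∈ (L.foldl (pvStepFold steps pos) (q0, v0)).2 ↔ x ∈ v0 ∨ x ∈ t.map Prod.fst)
      ∧ (∀ e ∈ t, e.2 = steps + 1 ∧ e.1 ∉ v0 ∧ ∃ cl ∈ L, nextIn cl.2 pos = some e.1)
      ∧ (t.map Prod.fst).Nodup
      ∧ (∀ cl ∈ L, ∀ x, nextIn cl.2 pos = some x → x ∈ (L.foldl (pvStepFold steps pos) (q0, v0)).2) := by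
  induction L with
  | nil =>
    intro q0 v0
    exact ⟨[], by simp, by simp, by simp, by simp, by simp⟩
  | cons cl L ih =>
    intro q0 v0
    simp only [List.foldl_cons]
    by_cases h1 : PySem.List.bisectRight cl.2 pos = cl.2.length
    · rw [pvStepFold_eval, if_pos h1]
      obtain ⟨t, ha, hb, hc, hd, he⟩ := ih q0 v0
      have hnone : nextIn cl.2 pos = none := by
        unfold nextIn
        exact List.getElem?_eq_none (by omega)
      refine ⟨t, ha, hb, ?_, hd, ?_⟩
      · intro e het
        obtain ⟨h1', h2', cl', hcl', h3'⟩ := hc e het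
        exact ⟨h1', h2', cl', List.mem_cons_of_mem _ hcl', h3'⟩
      · intro cl' hcl' x hx
        rcases List.mem_cons.mp hcl' with rfl | hm
        · rw [hnone] at hx; cases hx
        · exact he cl' hm x hx
    · have hj : PySem.List.bisectRight cl.2 pos < cl.2.length :=
        lt_of_le_of_ne (bisectRight_le _ _) h1
      have hget : PySem.List.pyGetD cl.2 ((PySem.List.bisectRight cl.2 pos : Nat) : Int) 0
          = cl.2[PySem.List.bisectRight cl.2 pos] := by
        rw [PySem.List.pyGetD_natCast, List.getD_eq_getElem?_getD, List.getElem?_eq_getElem hj]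
        rfl
      have hsome : nextIn cl.2 pos = some (cl.2[PySem.List.bisectRight cl.2 pos]) := by
        unfold nextIn
        rw [List.getElem?_eq_getElem hj]
      by_cases h2 : v0.contains (cl.2[PySem.List.bisectRight cl.2 pos]) = true
      · rw [pvStepFold_eval, if_neg h1, hget, if_pos h2]
        obtain ⟨t, ha, hb, hc, hd, he⟩ := ih q0 v0
        refine ⟨t, ha, hb, ?_, hd, ?_⟩
        · intro e het
          obtain ⟨h1', h2', cl', hcl', h3'⟩ := hc e het
          exact ⟨h1', h2', cl', List.mem_cons_of_mem _ hcl', h3'⟩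
        · intro cl' hcl' x hx
          rcases List.mem_cons.mp hcl' with rfl | hm
          · rw [hsome] at hx
            cases hx
            exact (hb _).mpr (Or.inl ((set_contains_iff _ _).mp h2))
          · exact he cl' hm x hx
      · rw [pvStepFold_eval, if_neg h1, hget, if_neg h2]
        obtain ⟨t', ha, hb, hc, hd, he⟩ :=
          ih (q0 ++ [(cl.2[PySem.List.bisectRight cl.2 pos], steps + 1)])
             (v0.add (cl.2[PySem.List.bisectRight cl.2 pos]))
        refine ⟨(cl.2[PySem.List.bisectRight cl.2 pos], steps + 1) :: t', ?_, ?_, ?_, ?_, ?_⟩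
        · rw [ha, List.append_assoc]
          rfl
        · intro x
          rw [hb x, PySem.Set.mem_add]
          simp only [List.map_cons, List.mem_cons]
          tauto
        · intro e het
          rcases List.mem_cons.mp het with rfl | hm
          · refine ⟨rfl, fun hmm => h2 ((set_contains_iff _ _).mpr hmm), cl,
              List.mem_cons_self, hsome⟩
          · obtain ⟨h1', h2', cl', hcl', h3'⟩ := hc e hm
            refine ⟨h1', fun hmm => h2' ((PySem.Set.mem_add _ _ _).mpr (Or.inl hmm)),
              cl', List.mem_cons_of_mem _ hcl', h3'⟩
        · simp only [List.map_cons]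
          refine List.Nodup.cons ?_ hd
          intro hmm
          obtain ⟨e, he', hfst⟩ := List.mem_map.mp hmm
          have := (hc e he').2.1
          rw [hfst] at this
          exact this ((PySem.Set.mem_add _ _ _).mpr (Or.inr rfl))
        · intro cl' hcl' x hx
          rcases List.mem_cons.mp hcl' with rfl | hm
          · rw [hsome] at hx
            cases hx
            exact (hb _).mpr (Or.inl ((PySem.Set.mem_add _ _ _).mpr (Or.inr rfl)))
          · exact he cl' hm x hx

theorem QInv_preserved (cs : List Int) (pos : Int) (rest : List (Int × Int))
    (vis : PySem.Set Int)
    (hq : QInv cs ((pos, (fdI cs pos : Int)) :: rest) vis)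
    (hne : pos ≠ (cs.length : Int) - 1) :
    QInv cs ((pvBoard cs).items.foldl (pvStepFold (fdI cs pos : Int) pos) (rest, vis)).1
           ((pvBoard cs).items.foldl (pvStepFold (fdI cs pos : Int) pos) (rest, vis)).2 := by
  obtain ⟨inv0, inv3, inv1, inv2, invN, inv4, inv5, inv7⟩ := hq
  obtain ⟨t, ha, hb, hc, hd, he⟩ :=
    pvFoldl_spec ((fdI cs pos : Int)) pos (pvBoard cs).items rest vis
  have hhead := inv1 (pos, (fdI cs pos : Int)) List.mem_cons_self
  have hpos1 : -1 ≤ pos := hhead.1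
  have hposn : pos < (cs.length : Int) := hhead.2.1
  have hposv : pos ∈ vis := hhead.2.2.1
  have hT : ∀ e ∈ t, e.2 = (fdI cs pos : Int) + 1 ∧ e.1 ∉ vis ∧ 0 ≤ e.1
      ∧ e.1 < (cs.length : Int) ∧ PStep cs pos e.1.toNat ∧ fdI cs e.1 = fdI cs pos + 1 := by
    intro e het
    obtain ⟨hs, hnv, cl, hcl, hnx⟩ := hc e het
    obtain ⟨hx0, hxn, hstep⟩ := board_next_PStep cs hcl hnx
    refine ⟨hs, hnv, hx0, hxn, hstep, ?_⟩
    have hup : fd cs (e.1.toNat + 1) ≤ fdI cs pos + 1 := fdI_step_le cs hpos1 hstep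
    have hfdIe : fdI cs e.1 = fd cs (e.1.toNat + 1) := by
      unfold fdI; congr 1; omega
    have hlow : ¬ (fdI cs e.1 ≤ fdI cs pos) := by
      intro hle
      exact hnv (inv4 pos ((fdI cs pos : Int)) rest rfl e.1 (by omega) hxn (by exact_mod_cast hle))
    omega
  have hmono : ∀ x : Int, x ∈ vis →
      x ∈ ((pvBoard cs).items.foldl (pvStepFold (fdI cs pos : Int) pos) (rest, vis)).2 :=
    fun x hx => (hb x).mpr (Or.inl hx)
  rw [ha]
  -- components
  have inv2rest : rest.Pairwise (fun a b => a.2 ≤ b.2 ∧ b.2 ≤ a.2 + 1) :=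
    (List.pairwise_cons.mp inv2).2
  have invHrest := (List.pairwise_cons.mp inv2).1
  have hinv2' : (rest ++ t).Pairwise (fun a b => a.2 ≤ b.2 ∧ b.2 ≤ a.2 + 1) := by
    rw [List.pairwise_append]
    refine ⟨inv2rest, ?_, ?_⟩
    · apply List.pairwise_of_forall_mem_list
      intro a hat b hbt
      have h1 := (hT a hat).1
      have h2 := (hT b hbt).1
      omega
    · intro a har b hbt
      have h1 := invHrest a har
      have h2 := (hT b hbt).1
      omega
  have hinv1' : ∀ e ∈ rest ++ t, -1 ≤ e.1 ∧ e.1 < (cs.length : Int)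
      ∧ e.1 ∈ ((pvBoard cs).items.foldl (pvStepFold (fdI cs pos : Int) pos) (rest, vis)).2
      ∧ e.2 = (fdI cs e.1 : Int) := by
    intro e hee
    rcases List.mem_append.mp hee with h | h
    · obtain ⟨b1, b2, b3, b4⟩ := inv1 e (List.mem_cons_of_mem _ h)
      exact ⟨b1, b2, hmono _ b3, b4⟩
    · obtain ⟨hs, hnv, hx0, hxn, hstep, hfd⟩ := hT e h
      refine ⟨by omega, hxn, (hb _).mpr (Or.inr (List.mem_map.mpr ⟨e, h, rfl⟩)), ?_⟩
      rw [hs]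
      push_cast [hfd]
      ring
  refine ⟨hmono _ inv0, ?_, hinv1', hinv2', ?_, ?_, ?_, ?_⟩
  · -- bounds on vis'
    intro x hx
    rcases (hb x).mp hx with h | h
    · exact inv3 x h
    · obtain ⟨e, het, rfl⟩ := List.mem_map.mp h
      have := hT e het
      exact ⟨by omega, this.2.2.2.1⟩
  · -- nodup of fsts
    rw [List.map_append, List.nodup_append]
    refine ⟨(List.nodup_cons.mp invN).2, hd, ?_⟩
    intro a har b hbt hab
    obtain ⟨ea, hea, rfl⟩ := List.mem_map.mp har
    obtain ⟨eb, heb, rfl⟩ := List.mem_map.mp hbt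
    have hav : ea.1 ∈ vis := (inv1 ea (List.mem_cons_of_mem _ hea)).2.2.1
    have hbv : eb.1 ∉ vis := (hT eb heb).2.1
    rw [hab] at hav
    exact hbv hav
  · -- layer invariant
    intro p0 s0 t'' heq u hu1 hu2 hu3
    have hmem0 : (p0, s0) ∈ rest ++ t := by rw [heq]; exact List.mem_cons_self
    have hs0 : (fdI cs pos : Int) ≤ s0 ∧ s0 ≤ (fdI cs pos : Int) + 1 := by
      rcases List.mem_append.mp hmem0 with h | h
      · exact invHrest _ h
      · have := (hT _ h).1; omega
    by_cases hle : (fdI cs u : Int) ≤ (fdI cs pos : Int)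
    · exact hmono _ (inv4 pos _ rest rfl u hu1 hu2 hle)
    · have hgt : (fdI cs pos : Int) < (fdI cs u : Int) := by omega
      have hfdu : (fdI cs u : Int) = (fdI cs pos : Int) + 1 := by omega
      have hu0 : 0 ≤ u := by
        by_contra hu0
        have hueq : u = -1 := by omega
        rw [hueq] at hfdu
        rw [fdI_neg_one] at hfdu
        simp at hfdu
        omega
      have hi : u.toNat < cs.length := by omega
      have hfd1 : fd cs (u.toNat + 1) = fdI cs pos + 1 := by
        have h1 : fdI cs u = fd cs (u.toNat + 1) := by
          unfold fdI; congr 1; omega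
        omega
      obtain ⟨w, hw1, hwstep, hwfd⟩ := fdI_pred cs hi hfd1
      have hwn : w < (cs.length : Int) := by
        have := hwstep.2.1
        omega
      have hwv : w ∈ vis := inv4 pos _ rest rfl w hw1 hwn (by rw [hwfd])
      have hwq : ∀ s, (w, s) ∉ rest ++ t := by
        intro s hws
        rcases List.mem_append.mp hws with h | h
        · have hsval : s = (fdI cs w : Int) := (inv1 _ (List.mem_cons_of_mem _ h)).2.2.2
          have hmem2 : (w, s) ∈ (p0, s0) :: t'' := by rw [← heq]; exact hws
          rcases List.mem_cons.mp hmem2 with he2 | he2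
          · have hw0 : w = p0 ∧ s = s0 := by
              constructor <;> [exact congrArg Prod.fst he2; exact congrArg Prod.snd he2]
            rw [hwfd] at hsval
            omega
          · have := (List.pairwise_cons.mp (heq ▸ hinv2')).1 _ he2
            rw [hwfd] at hsval
            omega
        · have := (hT _ h).2.2.2.2.2
          rw [hwfd] at this
          omega
      have hucl : ((u.toNat : Int))
          ∈ ((pvBoard cs).items.foldl (pvStepFold (fdI cs pos : Int) pos) (rest, vis)).2 := by
        by_cases hwp : w = pos
        · subst hwp
          obtain ⟨cl, hcl, hnx⟩ := succ_exists_in_board cs hwstep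
          exact he cl hcl _ hnx
        · have hwold : ∀ s, (w, s) ∉ (pos, (fdI cs pos : Int)) :: rest := by
            intro s hws
            rcases List.mem_cons.mp hws with he2 | he2
            · exact hwp (congrArg Prod.fst he2)
            · exact hwq s (List.mem_append_left _ he2)
          exact hmono _ (inv5 w hwv hwold u.toNat hwstep)
      have hueq : u = ((u.toNat : Int)) := by omega
      rw [hueq]
      exact hucl
  · -- closure of processed nodes
    intro u hu hnotin i hstep
    rcases (hb u).mp hu with h | h
    · by_cases hup : u = pos
      · subst hup
        obtain ⟨cl, hcl, hnx⟩ := succ_exists_in_board cs hstep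
        exact he cl hcl _ hnx
      · have hold : ∀ s, (u, s) ∉ (pos, (fdI cs pos : Int)) :: rest := by
          intro s hus
          rcases List.mem_cons.mp hus with he2 | he2
          · exact hup (congrArg Prod.fst he2)
          · exact hnotin s (List.mem_append_left _ he2)
        exact hmono _ (inv5 u h hold i hstep)
    · obtain ⟨e, het, rfl⟩ := List.mem_map.mp h
      have hee : (e.1, (fdI cs pos : Int) + 1) ∈ t := by
        rw [← (hT e het).1]
        simpa using het
      exact absurd (List.mem_append_right rest hee) (hnotin _)
  · -- target stays queued
    intro hmem
    rcases (hb _).mp hmem with h | h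
    · obtain ⟨s, hs⟩ := inv7 h
      rcases List.mem_cons.mp hs with he2 | he2
      · exact absurd (congrArg Prod.fst he2).symm hne
      · exact ⟨s, List.mem_append_left _ he2⟩
    · obtain ⟨e, het, hfst⟩ := List.mem_map.mp h
      refine ⟨(fdI cs pos : Int) + 1, List.mem_append_right _ ?_⟩
      rw [← hfst, ← (hT e het).1]
      simpa using het

theorem QInv_empty_absurd (cs : List Int) (vis : PySem.Set Int) (hn : 1 ≤ cs.length)
    (hq : QInv cs [] vis) : False := by
  obtain ⟨inv0, _, _, _, _, _, inv5, inv7⟩ := hq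
  have hcl : ∀ u ∈ vis, ∀ i : Nat, PStep cs u i → ((i : Int) ∈ vis) :=
    fun u hu i hs => inv5 u hu (fun s hs' => by simp at hs') i hs
  obtain ⟨s, hs⟩ := inv7 (closure_reaches cs vis hn hcl inv0)
  simp at hs

theorem QInv_init (cs : List Int) (hn : 1 ≤ cs.length) :
    QInv cs [(-1, 0)] (PySem.Set.ofList [-1]) := by
  have hv : ∀ x : Int, x ∈ (PySem.Set.ofList [(-1 : Int)] : List Int) ↔ x = -1 := by
    intro x
    rw [PySem.Set.mem_ofList]
    simp
  refine ⟨(hv (-1)).mpr rfl, ?_, ?_, by simp, by simp, ?_, ?_, ?_⟩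
  · intro x hx
    rw [hv x] at hx
    subst hx
    constructor <;> omega
  · intro e hee
    rw [List.mem_singleton] at hee
    subst hee
    exact ⟨by omega, by omega, (hv (-1)).mpr rfl, rfl⟩
  · intro p0 s0 t heq u hu1 hu2 hu3
    have hp : p0 = -1 ∧ s0 = 0 ∧ t = [] := by
      have h1 := List.head_eq_of_cons_eq heq.symm
      have h2 := List.tail_eq_of_cons_eq heq.symm
      exact ⟨(congrArg Prod.fst h1), (congrArg Prod.snd h1), h2⟩
    obtain ⟨_, hs0, _⟩ := hp
    subst hs0
    by_cases hu0 : 0 ≤ u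
    · exfalso
      have h1 : (u + 1).toNat = u.toNat + 1 := by omega
      have h2 := fd_pos cs u.toNat
      have h3 : fdI cs u = fd cs (u.toNat + 1) := by unfold fdI; rw [h1]
      omega
    · have : u = -1 := by omega
      subst this
      exact (hv (-1)).mpr rfl
  · intro u hu hnotin i hstep
    rw [hv u] at hu
    subst hu
    exact absurd (List.mem_singleton_self _) (hnotin 0)
  · intro hmem
    rw [hv] at hmem
    exfalso
    omega

theorem bfsLoop_eq (cs : List Int) (hn : 1 ≤ cs.length) :
    ∀ (q : List (Int × Int)) (vis : PySem.Set Int), QInv cs q vis →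
      bfsLoop (cs.length : Int) (pvBoard cs).items q vis = (fd cs cs.length : Int) := by
  intro q vis
  induction q, vis using bfsLoop.induct ((cs.length : Int)) (pvBoard cs).items with
  | case1 vis =>
    intro hq
    exact (QInv_empty_absurd cs vis hn hq).elim
  | case2 steps rest vis =>
    intro hq
    rw [bfsLoop]
    rw [if_pos rfl]
    have hsteps : steps = (fdI cs ((cs.length : Int) - 1) : Int) :=
      (hq.2.2.1 _ List.mem_cons_self).2.2.2
    rw [hsteps]
    norm_cast
    unfold fdI
    congr 1
    omega
  | case3 pos steps rest vis hne st ih =>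
    intro hq
    rw [bfsLoop]
    rw [if_neg hne]
    have hst_eq : st = (pvBoard cs).items.foldl (pvStepFold steps pos) (rest, vis) :=
      List.foldl_attach (l := (pvBoard cs).items) (f := pvStepFold steps pos) (b := (rest, vis))
    rw [hst_eq] at ih
    have hsteps : steps = (fdI cs pos : Int) :=
      (hq.2.2.1 _ List.mem_cons_self).2.2.2
    subst hsteps
    exact ih (QInv_preserved cs pos rest vis hq hne)

theorem board_search_eq_fd (cs : List Int) : board_search cs = (fd cs cs.length : Int) := by
  cases cs with
  | nil =>
    show bfsLoop ((0 : Nat) : Int) (pvBoard []).items [(-1, 0)] (PySem.Set.ofList [-1]) = _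
    rw [bfsLoop]
    norm_num
  | cons a l =>
    show bfsLoop (((a :: l).length : Int)) (pvBoard (a :: l)).items [(-1, 0)]
      (PySem.Set.ofList [-1]) = _
    exact bfsLoop_eq (a :: l) (by simp) _ _ (QInv_init (a :: l) (by simp))

def intsOf (l : List Nat) : List Int := l.map (fun (k : Nat) => (k : Int))

def lastOcc (cs : List Int) (i : Nat) (v : Int) : Int :=
  (List.range i).foldl (fun acc j => if cget cs j = v then (j : Int) else acc) (-1)

theorem intsOf_cons (x : Nat) (t : List Nat) : intsOf (x :: t) = (x : Int) :: intsOf t := rfl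

theorem intsOf_length (l : List Nat) : (intsOf l).length = l.length := by
  simp [intsOf]

theorem intsOf_drop (l : List Nat) (k : Nat) : (intsOf l).drop k = intsOf (l.drop k) := by
  simp [intsOf, List.map_drop]

theorem lastOcc_pvN (cs : List Int) (i : Nat) :
    lastOcc cs i (cget cs i) + 1 = (pvN cs i : Int) := by
  unfold lastOcc pvN
  have H : ∀ m : Nat,
      (List.range m).foldl (fun acc j => if cget cs j = cget cs i then (j : Int) else acc) (-1) + 1
      = (((List.range m).foldl (fun acc j => if cget cs j = cget cs i then j + 1 else acc) 0 : Nat) : Int) := by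
    intro m
    induction m with
    | zero => simp
    | succ m ih =>
      rw [List.range_succ, List.foldl_append, List.foldl_append]
      simp only [List.foldl_cons, List.foldl_nil]
      by_cases hc : cget cs m = cget cs i
      · simp [hc]
      · simp only [hc, if_false]
        exact ih
  exact H i

theorem castFoldlMin (tl : List Nat) : ∀ (x : Nat),
    (intsOf tl).foldl min ((x : Nat) : Int) = ((tl.foldl min x : Nat) : Int) := by
  induction tl with
  | nil => intro x; rfl
  | cons y t ih =>
    intro x
    rw [intsOf_cons]
    simp only [List.foldl_cons]
    rw [← Nat.cast_min, ih]

theorem minCast (l : List Nat) (hne : l ≠ []) :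
    (PySem.List.min? (intsOf l) (fun x => x)).getD 0 = (listMinN l : Int) := by
  cases l with
  | nil => exact absurd rfl hne
  | cons x tl =>
    rw [intsOf_cons, PySem.List.min?_id_cons]
    simp only [Option.getD_some]
    show _ = ((tl.foldl min x : Nat) : Int)
    exact castFoldlMin tl x

theorem B_invariant (cs : List Int) : ∀ i ≤ cs.length,
    ∃ dct : PySem.Dict Int Int,
      ((PySem.List.enumerate cs).take i).foldl
        (fun (st : List Int × PySem.Dict Int Int) ic =>
          let p := st.2.getD ic.2 (-1)
          let s := PySem.List.slice st.1 (some (p + 1)) (some (ic.1 + 1))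
          let m := (PySem.List.min? s (fun x => x)).getD 0
          (PySem.List.pySetD st.1 (ic.1 + 1) (1 + m), st.2.insert ic.2 ic.1))
        (List.replicate (cs.length + 1) 0, PySem.Dict.empty)
      = (intsOf (fdL cs i) ++ List.replicate (cs.length - i) 0, dct)
      ∧ ∀ v : Int, dct.getD v (-1) = lastOcc cs i v := by
  intro i
  induction i with
  | zero =>
    intro _
    refine ⟨PySem.Dict.empty, ?_, ?_⟩
    · show (List.replicate (cs.length + 1) 0, PySem.Dict.empty) = _
      rw [List.replicate_succ]
      rfl
    · intro v
      simp [lastOcc, PySem.Dict.getD_eq_get?_getD, PySem.Dict.get?_empty]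
  | succ i ih =>
    intro hle
    have hi : i < cs.length := by omega
    obtain ⟨dct, hst, hdct⟩ := ih (by omega)
    have hlen : (PySem.List.enumerate cs).length = cs.length := PySem.List.length_enumerate cs 0
    have htake : (PySem.List.enumerate cs).take (i + 1)
        = (PySem.List.enumerate cs).take i ++ [((i : Int), cs[i])] := by
      rw [List.take_succ]
      congr
      rw [List.getElem?_eq_getElem (by omega)]
      rw [PySem.List.getElem_enumerate]
      simp
    rw [htake, List.foldl_append, hst]
    simp only [List.foldl_cons, List.foldl_nil]
    have hDLlen : (intsOf (fdL cs i)).length = i + 1 := by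
      rw [intsOf_length, fdL_length]
    have hp1 : dct.getD cs[i] (-1) + 1 = (pvN cs i : Int) := by
      have h0 : dct.getD cs[i] (-1) = lastOcc cs i (cget cs i) := by
        rw [hdct, cget_eq cs hi]
      rw [h0]
      exact lastOcc_pvN cs i
    have hslice : PySem.List.slice (intsOf (fdL cs i) ++ List.replicate (cs.length - i) 0)
        (some (dct.getD cs[i] (-1) + 1)) (some ((i : Int) + 1))
        = intsOf ((fdL cs i).drop (pvN cs i)) := by
      rw [hp1]
      rw [PySem.List.slice_toNat _ (Int.natCast_nonneg _) (by omega)]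
      have e1 : ((pvN cs i : Int)).toNat = pvN cs i := Int.toNat_natCast _
      have e2 : ((i : Int) + 1).toNat = i + 1 := by omega
      rw [e1, e2]
      rw [List.drop_append_of_le_length (by rw [hDLlen]; have := pvN_le cs i; omega)]
      have e3 : ((intsOf (fdL cs i)).drop (pvN cs i)).length = i + 1 - pvN cs i := by
        rw [List.length_drop, hDLlen]
      rw [List.take_append_of_le_length (le_of_eq e3.symm)]
      rw [List.take_of_length_le (le_of_eq e3)]
      rw [intsOf_drop]
    rw [hslice, minCast _ (drop_fdL_ne_nil cs i)]
    have hset : PySem.List.pySetD (intsOf (fdL cs i) ++ List.replicate (cs.length - i) 0)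
        ((i : Int) + 1) (1 + (listMinN ((fdL cs i).drop (pvN cs i)) : Int))
        = intsOf (fdL cs (i + 1)) ++ List.replicate (cs.length - (i + 1)) 0 := by
      rw [PySem.List.pySetD_of_nonneg _ _ (by omega)]
      have e2 : ((i : Int) + 1).toNat = i + 1 := by omega
      rw [e2, List.set_append, if_neg (by rw [hDLlen]; omega), hDLlen]
      simp only [Nat.sub_self]
      have hrep : List.replicate (cs.length - i) (0 : Int)
          = 0 :: List.replicate (cs.length - (i + 1)) 0 := by
        rw [← List.replicate_succ]
        congr 1
        omega
      rw [hrep, List.set_cons_zero]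
      show _ = intsOf (fdL cs i ++ [1 + listMinN ((fdL cs i).drop (pvN cs i))])
        ++ List.replicate (cs.length - (i + 1)) 0
      unfold intsOf
      simp [List.map_append]
    refine ⟨dct.insert cs[i] (i : Int), ?_, ?_⟩
    · rw [hset]
    · intro v
      rw [PySem.Dict.getD_insert]
      unfold lastOcc
      rw [List.range_succ, List.foldl_append]
      simp only [List.foldl_cons, List.foldl_nil]
      by_cases hc : v = cs[i]
      · rw [if_pos hc, if_pos (by rw [cget_eq cs hi, hc])]
      · rw [if_neg hc, if_neg (by rw [cget_eq cs hi]; exact fun h => hc h.symm)]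
        exact hdct v

theorem board_search_alt_eq_fd (cs : List Int) :
    board_search_alt cs = (fd cs cs.length : Int) := by
  obtain ⟨dct, hst, _⟩ := B_invariant cs cs.length (le_refl _)
  have hlen : (PySem.List.enumerate cs).length = cs.length := PySem.List.length_enumerate cs 0
  show PySem.List.pyGetD
      ((PySem.List.enumerate cs).foldl
        (fun (st : List Int × PySem.Dict Int Int) ic =>
          let p := st.2.getD ic.2 (-1)
          let s := PySem.List.slice st.1 (some (p + 1)) (some (ic.1 + 1))
          let m := (PySem.List.min? s (fun x => x)).getD 0
          (PySem.List.pySetD st.1 (ic.1 + 1) (1 + m), st.2.insert ic.2 ic.1))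
        (List.replicate (cs.length + 1) 0, PySem.Dict.empty)).1 ((cs.length : Nat) : Int) 0 = _
  rw [show (PySem.List.enumerate cs) = (PySem.List.enumerate cs).take cs.length by
    rw [← hlen, List.take_length]]
  rw [hst]
  simp only [Nat.sub_self, List.replicate_zero, List.append_nil]
  rw [PySem.List.pyGetD_natCast]
  unfold intsOf
  rw [List.getD_eq_getElem?_getD,
    List.getElem?_eq_getElem (by rw [List.length_map, fdL_length]; omega)]
  simp only [Option.getD_some, List.getElem_map]
  rw [fd_getElem cs (le_refl _)]

-- ===== VERDICT (by name: the statement is the Claim_ definition above) =====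
theorem board_search_spec : Claim_equal_board_search := by
  intro colors _
  unfold Spec_board_search
  rw [board_search_eq_fd, board_search_alt_eq_fd]
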